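-- pv_equiv track=rewrite | github.com/tajoumaru/ids.moe | api/index.py | resolve_platform
-- ===== SOURCE A (Python) =====
-- PLATFORM_SYNONYMS = {
--     "anidb": ["ad", "adb", "anidb.net"],
--     "anilist": ["al", "anilist.co"],
--     "animeplanet": ["ap", "anime-planet", "anime-planet.com", "animeplanet.com"],
--     "anisearch": ["as", "anisearch.de", "anisearch.es", "anisearch.fr", "anisearch.it", "anisearch.jp", "anisearch.com"],
--     "annict": ["ac", "act", "anc", "annict.com", "annict.jp", "en.annict.com"],
--     "imdb": ["im", "imdb.com"],
--     "kaize": ["kz", "kaize.io"],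
--     "kitsu": ["kt", "kts", "kitsu.app", "kitsu.io"],
--     "kurozora": ["kr", "krz", "kurozora.app"],
--     "letterboxd": ["lb", "letterboxd.com"],
--     "livechart": ["lc", "livechart.me"],
--     "myanimelist": ["ma", "ml", "mal", "myanimelist.net"],
--     "nautiljon": ["nj", "ntj", "nautiljon.com"],
--     "notify": ["nf", "nm", "ntf", "ntm", "notifymoe", "notify.moe"],
--     "otakotaku": ["oo", "otakotaku.com"],
--     "shikimori": ["sh", "shk", "shiki", "shikimori.me", "shikimori.one", "shikimori.org"],
--     "shoboi": ["sb", "shb", "syb", "syoboi", "shobocal", "syobocal", "cal.syoboi.jp"],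
--     "silveryasha": ["sy", "dbti", "db.silveryasha.id", "db.silveryasha.web.id"],
--     "simkl": ["sm", "smk", "simkl.com", "animecountdown", "animecountdown.com"],
--     "themoviedb": ["tm", "tmdb", "tmdb.org"],
--     "trakt": ["tr", "trk", "trakt.tv"],
-- }
--
-- def resolve_platform(platform: str) -> str:
--     """
--     Resolve platform input to a standard platform name
--
--     :param platform: Platform name
--     :type platform: str
--     :return: Standard platform name
--     :rtype: str
--     """
--     platform = platform.lower()
--     # Create a lookup dictionary including both proper names and aliases
--     lookup = {
--         alias: key
--         for key, aliases in PLATFORM_SYNONYMS.items()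
--         for alias in [key] + aliases
--     }
--     return lookup.get(platform, platform)
-- ===== SOURCE B (Python) =====
-- _ALIAS_TABLE = [
--     ('ac', 'annict'),
--     ('act', 'annict'),
--     ('ad', 'anidb'),
--     ('adb', 'anidb'),
--     ('al', 'anilist'),
--     ('anc', 'annict'),
--     ('anidb', 'anidb'),
--     ('anidb.net', 'anidb'),
--     ('anilist', 'anilist'),
--     ('anilist.co', 'anilist'),
--     ('anime-planet', 'animeplanet'),
--     ('anime-planet.com', 'animeplanet'),
--     ('animecountdown', 'simkl'),
--     ('animecountdown.com', 'simkl'),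
--     ('animeplanet', 'animeplanet'),
--     ('animeplanet.com', 'animeplanet'),
--     ('anisearch', 'anisearch'),
--     ('anisearch.com', 'anisearch'),
--     ('anisearch.de', 'anisearch'),
--     ('anisearch.es', 'anisearch'),
--     ('anisearch.fr', 'anisearch'),
--     ('anisearch.it', 'anisearch'),
--     ('anisearch.jp', 'anisearch'),
--     ('annict', 'annict'),
--     ('annict.com', 'annict'),
--     ('annict.jp', 'annict'),
--     ('ap', 'animeplanet'),
--     ('as', 'anisearch'),
--     ('cal.syoboi.jp', 'shoboi'),
--     ('db.silveryasha.id', 'silveryasha'),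
--     ('db.silveryasha.web.id', 'silveryasha'),
--     ('dbti', 'silveryasha'),
--     ('en.annict.com', 'annict'),
--     ('im', 'imdb'),
--     ('imdb', 'imdb'),
--     ('imdb.com', 'imdb'),
--     ('kaize', 'kaize'),
--     ('kaize.io', 'kaize'),
--     ('kitsu', 'kitsu'),
--     ('kitsu.app', 'kitsu'),
--     ('kitsu.io', 'kitsu'),
--     ('kr', 'kurozora'),
--     ('krz', 'kurozora'),
--     ('kt', 'kitsu'),
--     ('kts', 'kitsu'),
--     ('kurozora', 'kurozora'),
--     ('kurozora.app', 'kurozora'),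
--     ('kz', 'kaize'),
--     ('lb', 'letterboxd'),
--     ('lc', 'livechart'),
--     ('letterboxd', 'letterboxd'),
--     ('letterboxd.com', 'letterboxd'),
--     ('livechart', 'livechart'),
--     ('livechart.me', 'livechart'),
--     ('ma', 'myanimelist'),
--     ('mal', 'myanimelist'),
--     ('ml', 'myanimelist'),
--     ('myanimelist', 'myanimelist'),
--     ('myanimelist.net', 'myanimelist'),
--     ('nautiljon', 'nautiljon'),
--     ('nautiljon.com', 'nautiljon'),
--     ('nf', 'notify'),
--     ('nj', 'nautiljon'),
--     ('nm', 'notify'),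
--     ('notify', 'notify'),
--     ('notify.moe', 'notify'),
--     ('notifymoe', 'notify'),
--     ('ntf', 'notify'),
--     ('ntj', 'nautiljon'),
--     ('ntm', 'notify'),
--     ('oo', 'otakotaku'),
--     ('otakotaku', 'otakotaku'),
--     ('otakotaku.com', 'otakotaku'),
--     ('sb', 'shoboi'),
--     ('sh', 'shikimori'),
--     ('shb', 'shoboi'),
--     ('shiki', 'shikimori'),
--     ('shikimori', 'shikimori'),
--     ('shikimori.me', 'shikimori'),
--     ('shikimori.one', 'shikimori'),
--     ('shikimori.org', 'shikimori'),
--     ('shk', 'shikimori'),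
--     ('shobocal', 'shoboi'),
--     ('shoboi', 'shoboi'),
--     ('silveryasha', 'silveryasha'),
--     ('simkl', 'simkl'),
--     ('simkl.com', 'simkl'),
--     ('sm', 'simkl'),
--     ('smk', 'simkl'),
--     ('sy', 'silveryasha'),
--     ('syb', 'shoboi'),
--     ('syobocal', 'shoboi'),
--     ('syoboi', 'shoboi'),
--     ('themoviedb', 'themoviedb'),
--     ('tm', 'themoviedb'),
--     ('tmdb', 'themoviedb'),
--     ('tmdb.org', 'themoviedb'),
--     ('tr', 'trakt'),
--     ('trakt', 'trakt'),
--     ('trakt.tv', 'trakt'),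
--     ('trk', 'trakt'),
-- ]
--
-- def resolve_platform(platform: str) -> str:
--     """Resolve platform input to a standard platform name."""
--     platform = platform.lower()
--     lo, hi = 0, len(_ALIAS_TABLE)
--     while lo < hi:
--         mid = (lo + hi) // 2
--         name, canonical = _ALIAS_TABLE[mid]
--         if platform < name:
--             hi = mid
--         elif name < platform:
--             lo = mid + 1
--         else:
--             return canonical
--     return platform
-- ===== Notes on version B (the rewrite author's own statement) =====
-- stated objective: alternative
-- what changed: B drops the per-call inverted lookup-dict comprehension and instead binary-searches a precomputed sorted flat (alias, canonical) table, returning the canonical name on a hit and the lowercased input on a miss.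
import Mathlib
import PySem

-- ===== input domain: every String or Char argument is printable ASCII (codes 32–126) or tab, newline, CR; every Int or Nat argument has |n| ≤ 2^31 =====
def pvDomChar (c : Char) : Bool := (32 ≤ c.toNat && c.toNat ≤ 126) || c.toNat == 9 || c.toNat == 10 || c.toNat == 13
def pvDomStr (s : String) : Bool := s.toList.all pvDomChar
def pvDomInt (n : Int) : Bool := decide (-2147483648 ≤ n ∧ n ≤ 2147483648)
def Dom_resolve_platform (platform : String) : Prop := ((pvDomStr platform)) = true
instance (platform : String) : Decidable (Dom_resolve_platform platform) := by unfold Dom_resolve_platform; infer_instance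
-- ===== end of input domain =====

-- B replaces A's per-call inverted lookup-dict comprehension by binary search in a precomputed sorted flat (alias, canonical) table (objective: alternative).

-- ===== PORT A =====
-- PLATFORM_SYNONYMS, a module-level dict, as its items list (insertion order)
def pvSyn : List (String × List String) :=
  [("anidb", ["ad", "adb", "anidb.net"]),
   ("anilist", ["al", "anilist.co"]),
   ("animeplanet", ["ap", "anime-planet", "anime-planet.com", "animeplanet.com"]),
   ("anisearch", ["as", "anisearch.de", "anisearch.es", "anisearch.fr", "anisearch.it", "anisearch.jp", "anisearch.com"]),
   ("annict", ["ac", "act", "anc", "annict.com", "annict.jp", "en.annict.com"]),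
   ("imdb", ["im", "imdb.com"]),
   ("kaize", ["kz", "kaize.io"]),
   ("kitsu", ["kt", "kts", "kitsu.app", "kitsu.io"]),
   ("kurozora", ["kr", "krz", "kurozora.app"]),
   ("letterboxd", ["lb", "letterboxd.com"]),
   ("livechart", ["lc", "livechart.me"]),
   ("myanimelist", ["ma", "ml", "mal", "myanimelist.net"]),
   ("nautiljon", ["nj", "ntj", "nautiljon.com"]),
   ("notify", ["nf", "nm", "ntf", "ntm", "notifymoe", "notify.moe"]),
   ("otakotaku", ["oo", "otakotaku.com"]),
   ("shikimori", ["sh", "shk", "shiki", "shikimori.me", "shikimori.one", "shikimori.org"]),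
   ("shoboi", ["sb", "shb", "syb", "syoboi", "shobocal", "syobocal", "cal.syoboi.jp"]),
   ("silveryasha", ["sy", "dbti", "db.silveryasha.id", "db.silveryasha.web.id"]),
   ("simkl", ["sm", "smk", "simkl.com", "animecountdown", "animecountdown.com"]),
   ("themoviedb", ["tm", "tmdb", "tmdb.org"]),
   ("trakt", ["tr", "trk", "trakt.tv"])]

-- the dict comprehension: {alias: key for key, aliases in PLATFORM_SYNONYMS.items() for alias in [key] + aliases}
def pvLookup : PySem.Dict String String :=
  pvSyn.foldl (fun d kv => ([kv.1] ++ kv.2).foldl (fun d a => d.insert a kv.1) d) PySem.Dict.empty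

def resolve_platform (platform : String) : String :=
  let platform := PySem.Str.lower platform
  pvLookup.getD platform platform

-- ===== PORT B =====
-- _ALIAS_TABLE: B's module-level sorted flat (alias, canonical) table
def pvTable : List (String × String) :=
  [("ac", "annict"),
   ("act", "annict"),
   ("ad", "anidb"),
   ("adb", "anidb"),
   ("al", "anilist"),
   ("anc", "annict"),
   ("anidb", "anidb"),
   ("anidb.net", "anidb"),
   ("anilist", "anilist"),
   ("anilist.co", "anilist"),
   ("anime-planet", "animeplanet"),
   ("anime-planet.com", "animeplanet"),
   ("animecountdown", "simkl"),
   ("animecountdown.com", "simkl"),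
   ("animeplanet", "animeplanet"),
   ("animeplanet.com", "animeplanet"),
   ("anisearch", "anisearch"),
   ("anisearch.com", "anisearch"),
   ("anisearch.de", "anisearch"),
   ("anisearch.es", "anisearch"),
   ("anisearch.fr", "anisearch"),
   ("anisearch.it", "anisearch"),
   ("anisearch.jp", "anisearch"),
   ("annict", "annict"),
   ("annict.com", "annict"),
   ("annict.jp", "annict"),
   ("ap", "animeplanet"),
   ("as", "anisearch"),
   ("cal.syoboi.jp", "shoboi"),
   ("db.silveryasha.id", "silveryasha"),
   ("db.silveryasha.web.id", "silveryasha"),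
   ("dbti", "silveryasha"),
   ("en.annict.com", "annict"),
   ("im", "imdb"),
   ("imdb", "imdb"),
   ("imdb.com", "imdb"),
   ("kaize", "kaize"),
   ("kaize.io", "kaize"),
   ("kitsu", "kitsu"),
   ("kitsu.app", "kitsu"),
   ("kitsu.io", "kitsu"),
   ("kr", "kurozora"),
   ("krz", "kurozora"),
   ("kt", "kitsu"),
   ("kts", "kitsu"),
   ("kurozora", "kurozora"),
   ("kurozora.app", "kurozora"),
   ("kz", "kaize"),
   ("lb", "letterboxd"),
   ("lc", "livechart"),
   ("letterboxd", "letterboxd"),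
   ("letterboxd.com", "letterboxd"),
   ("livechart", "livechart"),
   ("livechart.me", "livechart"),
   ("ma", "myanimelist"),
   ("mal", "myanimelist"),
   ("ml", "myanimelist"),
   ("myanimelist", "myanimelist"),
   ("myanimelist.net", "myanimelist"),
   ("nautiljon", "nautiljon"),
   ("nautiljon.com", "nautiljon"),
   ("nf", "notify"),
   ("nj", "nautiljon"),
   ("nm", "notify"),
   ("notify", "notify"),
   ("notify.moe", "notify"),
   ("notifymoe", "notify"),
   ("ntf", "notify"),
   ("ntj", "nautiljon"),
   ("ntm", "notify"),
   ("oo", "otakotaku"),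
   ("otakotaku", "otakotaku"),
   ("otakotaku.com", "otakotaku"),
   ("sb", "shoboi"),
   ("sh", "shikimori"),
   ("shb", "shoboi"),
   ("shiki", "shikimori"),
   ("shikimori", "shikimori"),
   ("shikimori.me", "shikimori"),
   ("shikimori.one", "shikimori"),
   ("shikimori.org", "shikimori"),
   ("shk", "shikimori"),
   ("shobocal", "shoboi"),
   ("shoboi", "shoboi"),
   ("silveryasha", "silveryasha"),
   ("simkl", "simkl"),
   ("simkl.com", "simkl"),
   ("sm", "simkl"),
   ("smk", "simkl"),
   ("sy", "silveryasha"),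
   ("syb", "shoboi"),
   ("syobocal", "shoboi"),
   ("syoboi", "shoboi"),
   ("themoviedb", "themoviedb"),
   ("tm", "themoviedb"),
   ("tmdb", "themoviedb"),
   ("tmdb.org", "themoviedb"),
   ("tr", "trakt"),
   ("trakt", "trakt"),
   ("trakt.tv", "trakt"),
   ("trk", "trakt")]

-- the while-loop binary search of Source B; fuel (initially the table length) bounds the loop.
-- Python's 'x < y' on strings is codepoint-lexicographic comparison: exactly '<' on List Char, so we compare via .toList.
def pvBsearch (t : List (String × String)) (s : String) : Nat → Nat → Nat → Option String
  | 0, _, _ => none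
  | fuel + 1, lo, hi =>
    if lo < hi then
      let mid := (lo + hi) / 2
      let kv := t.getD mid ("", "")
      if s.toList < kv.1.toList then pvBsearch t s fuel lo mid
      else if kv.1.toList < s.toList then pvBsearch t s fuel (mid + 1) hi
      else some kv.2
    else none

def resolve_platform_alt (platform : String) : String :=
  let platform := PySem.Str.lower platform
  match pvBsearch pvTable platform pvTable.length 0 pvTable.length with
  | some c => c
  | none => platform

-- ===== PRECONDITION & SPEC =====
def Spec_resolve_platform (platform : String) (out : String) : Prop := out = resolve_platform_alt platform
instance (platform : String) (out : String) : Decidable (Spec_resolve_platform platform out) := by unfold Spec_resolve_platform; infer_instance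

-- ===== CLAIM (what is proved, stated in full; the proofs are below) =====
def Claim_equal_resolve_platform : Prop := ∀ (platform : String), Dom_resolve_platform platform → Spec_resolve_platform platform (resolve_platform platform)

-- ===== LEMMAS AND PROOFS =====

-- every name occurring in A's table (keys and aliases, in table order)
def pvAll : List String := pvSyn.flatMap (fun kv => kv.1 :: kv.2)

-- the dict comprehension, as a literal association list (all 101 names are distinct, so inserts append)
def pvLookupList : List (String × String) :=
  pvSyn.flatMap (fun kv => (kv.1 :: kv.2).map (fun a => (a, kv.1)))

set_option maxRecDepth 8192 in
lemma pvLookup_eq : pvLookup = PySem.Dict.mk pvLookupList := by decide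

set_option maxRecDepth 8192 in
lemma pvLookupList_fst : pvLookupList.map (·.1) = pvAll := by decide

set_option maxRecDepth 8192 in
lemma pvTable_fst_mem_all : ∀ kv ∈ pvTable, kv.1 ∈ pvAll := by decide

-- a successful binary search found a pair of the table whose first component is s
lemma pvBsearch_some {t : List (String × String)} {s : String} {fuel lo hi : Nat} {c : String}
    (hhi : hi ≤ t.length) (h : pvBsearch t s fuel lo hi = some c) : (s, c) ∈ t := by
  induction fuel generalizing lo hi with
  | zero => simp [pvBsearch] at h
  | succ fuel ih =>
    simp only [pvBsearch] at h
    split_ifs at h with h1 h2 h3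
    · exact ih (Nat.le_trans (Nat.le_of_lt (by omega)) hhi) h
    · exact ih hhi h
    · have hmid : (lo + hi) / 2 < t.length := by omega
      have hget : t.getD ((lo + hi) / 2) ("", "") = t[(lo + hi) / 2] :=
        List.getD_eq_getElem t _ hmid
      have hp : t.getD ((lo + hi) / 2) ("", "") ∈ t := hget ▸ List.getElem_mem hmid
      have hs : s = (t.getD ((lo + hi) / 2) ("", "")).1 :=
        String.toList_inj.mp (le_antisymm (not_lt.mp h3) (not_lt.mp h2))
      have hc : (t.getD ((lo + hi) / 2) ("", "")).2 = c := Option.some.inj h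
      rw [hs, ← hc]
      simpa using hp

lemma pvBsearch_miss {s : String} (hs : s ∉ pvAll) :
    pvBsearch pvTable s pvTable.length 0 pvTable.length = none := by
  cases h : pvBsearch pvTable s pvTable.length 0 pvTable.length with
  | none => rfl
  | some c =>
    exact absurd (pvTable_fst_mem_all _ (pvBsearch_some (le_refl _) h)) hs

set_option maxRecDepth 16384 in
set_option maxHeartbeats 2000000 in
lemma pvCore (s : String) :
    pvLookup.getD s s =
      (match pvBsearch pvTable s pvTable.length 0 pvTable.length with
       | some c => c
       | none => s) := by
  rw [pvLookup_eq]
  by_cases h : s ∈ pvAll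
  · fin_cases h <;> decide
  · rw [pvBsearch_miss h]
    rw [PySem.Dict.getD_eq_get?_getD]
    have hn : (PySem.Dict.mk pvLookupList).get? s = none := by
      rw [PySem.Dict.get?_eq_none_iff_not_mem_keys]
      intro hm
      apply h
      rw [← pvLookupList_fst]
      simpa [PySem.Dict.keys] using hm
    rw [hn]
    rfl

-- ===== VERDICT (by name: the statement is the Claim_ definition above) =====
theorem resolve_platform_spec : Claim_equal_resolve_platform := by
  intro platform _
  unfold Spec_resolve_platform resolve_platform resolve_platform_alt
  exact pvCore _
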